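-- pv_equiv track=rewrite | github.com/Fondamenti18/fondamenti-di-programmazione | students/1795537/homework02/program02.py | creaDiz
-- ===== SOURCE A (Python) =====
-- def pulisciIns(insieme, diz):
--     '''rimuovo da insieme i valori non presenti nel file'''
--     insieme = [el for el in insieme if el in diz]
--     return insieme
--
-- def creaDiz(diz, insieme):
--     '''creo il dizionario contenente tutti i compiti da fare per poter svolgere i comp dell'insieme dato'''
--     insieme= pulisciIns(insieme,diz)
--     dizN={}
--     for el in insieme :
--         sub = ' '
--         ris = []
--         elOR = el
--         while sub != '':
--             if el in diz:
--                 sub = diz[el]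
--                 if sub != '':
--                     ris += [sub]
--                 el = sub
--             else: sub = ''
--         ris.reverse()
--         dizN[elOR] = ris
--     return(dizN)
-- ===== SOURCE B (Python) =====
-- def creaDiz(diz, insieme):
--     memo = {}
--     out = {}
--     for el in insieme:
--         if el not in diz:
--             continue
--         stack = []
--         cur = el
--         while cur not in memo:
--             nxt = diz.get(cur, '')
--             if nxt == '':
--                 memo[cur] = []
--                 break
--             stack.append((cur, nxt))
--             cur = nxt
--         while stack:
--             cur, nxt = stack.pop()
--             memo[cur] = memo[nxt] + [nxt]
--         out[el] = memo[el]
--     return out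
-- ===== Notes on version B (the rewrite author's own statement) =====
-- stated objective: alternative
-- what changed: B memoizes each key's reversed prerequisite chain in a dict (built by one descent plus a stack unwind per new key), so every chain link is computed once overall, instead of A re-walking the full chain from scratch for every element of insieme.
import Mathlib
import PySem

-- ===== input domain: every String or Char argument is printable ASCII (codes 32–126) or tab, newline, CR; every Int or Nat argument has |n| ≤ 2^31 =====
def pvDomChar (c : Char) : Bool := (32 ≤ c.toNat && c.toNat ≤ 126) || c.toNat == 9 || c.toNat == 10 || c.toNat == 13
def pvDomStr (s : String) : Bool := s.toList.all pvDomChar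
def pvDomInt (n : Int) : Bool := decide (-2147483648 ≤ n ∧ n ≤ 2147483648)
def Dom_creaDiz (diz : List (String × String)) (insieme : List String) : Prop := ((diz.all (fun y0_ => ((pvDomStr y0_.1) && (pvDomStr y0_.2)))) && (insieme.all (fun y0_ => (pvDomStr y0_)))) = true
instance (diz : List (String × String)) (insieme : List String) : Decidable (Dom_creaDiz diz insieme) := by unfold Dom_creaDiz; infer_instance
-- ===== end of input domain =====

-- B memoizes the reversed prerequisite chain per key (one descent plus a stack unwind per new
-- key), instead of A's re-walk of the whole chain for every element (objective: alternative).

-- ===== PORT A =====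
-- A's while loop; fuel only makes it total (under Pre_ the loop ends before fuel runs out).
def pvLoopA (d : PySem.Dict String String) : Nat → String → String → List String → List String
  | 0, _, _, ris => ris
  | f+1, sub, el, ris =>
    if sub = "" then ris
    else
      match d.get? el with
      | some s => pvLoopA d f s s (if s = "" then ris else ris ++ [s])
      | none => pvLoopA d f "" el ris

def creaDiz (diz : List (String × String)) (insieme : List String) : List (String × List String) :=
  let d := PySem.Dict.ofList diz
  let ins2 := insieme.filter (fun el => d.contains el)   -- pulisciIns
  (ins2.foldl (fun dizN el =>
      dizN.insert el ((pvLoopA d (diz.length + 2) " " el []).reverse))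
    PySem.Dict.empty).items

-- ===== PORT B =====
-- Source B's first while loop (descend until memo hit or empty successor); fuel for totality only.
def pvDescend (d : PySem.Dict String String) : Nat → PySem.Dict String (List String) → String → List (String × String) → List (String × String) × String × PySem.Dict String (List String)
  | 0, memo, cur, stack => (stack, cur, memo)
  | f+1, memo, cur, stack =>
    if memo.contains cur then (stack, cur, memo)
    else
      let nxt := d.getD cur ""
      if nxt = "" then (stack, cur, memo.insert cur [])
      else pvDescend d f memo nxt (stack ++ [(cur, nxt)])

-- Source B's second while loop: pop from the end of the stack, fill memo
def pvUnwind (stack : List (String × String)) (memo : PySem.Dict String (List String)) : PySem.Dict String (List String) :=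
  stack.foldr (fun p m => m.insert p.1 (m.getD p.2 [] ++ [p.2])) memo

def creaDiz_alt (diz : List (String × String)) (insieme : List String) : List (String × List String) :=
  let d := PySem.Dict.ofList diz
  ((insieme.foldl (fun st el =>
      if d.contains el then
        let r := pvDescend d (diz.length + 2) st.1 el []
        let memo2 := pvUnwind r.1 r.2.2
        (memo2, st.2.insert el (memo2.getD el []))
      else st)
    ((PySem.Dict.empty : PySem.Dict String (List String)), (PySem.Dict.empty : PySem.Dict String (List String)))).2).items

-- ===== PRECONDITION & SPEC =====
-- successor of a task: its prerequisite in the dict, "" if absent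
def pvStepF (diz : List (String × String)) : String → String :=
  fun y => (PySem.Dict.ofList diz).getD y ""

-- Pre_ excludes inputs whose prerequisite chain from some element of insieme never reaches ""
-- (a cycle in diz): on those A's while loop runs forever.  If a chain terminates at all, it does so
-- within diz.length + 1 steps, so this is a closed-form acyclicity condition on the input graph.
def Pre_creaDiz (diz : List (String × String)) (insieme : List String) : Prop :=
  ∀ el ∈ insieme, ∃ i < diz.length + 1, (pvStepF diz)^[i+1] el = ""
instance (diz : List (String × String)) (insieme : List String) : Decidable (Pre_creaDiz diz insieme) := by unfold Pre_creaDiz; infer_instance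

def pvWitness_creaDiz : (List (String × String)) × List String :=
  ([("a", "b"), ("b", ""), ("c", "a")], ["a", "c", "z", "a"])

def Spec_creaDiz (diz : List (String × String)) (insieme : List String) (out : List (String × List String)) : Prop := out = creaDiz_alt diz insieme
instance (diz : List (String × String)) (insieme : List String) (out : List (String × List String)) : Decidable (Spec_creaDiz diz insieme out) := by unfold Spec_creaDiz; infer_instance

-- ===== CLAIM (what is proved, stated in full; the proofs are below) =====
def Claim_equal_creaDiz : Prop := ∀ (diz : List (String × String)) (insieme : List String), Dom_creaDiz diz insieme → Pre_creaDiz diz insieme → Spec_creaDiz diz insieme (creaDiz diz insieme)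

-- ===== LEMMAS AND PROOFS =====

-- the forward chain of prerequisites from x (fuel-bounded)
def pvFC (d : PySem.Dict String String) : Nat → String → List String
  | 0, _ => []
  | f+1, x =>
    let s := d.getD x ""
    if s = "" then [] else s :: pvFC d f s

lemma pvLoopA_done (d : PySem.Dict String String) (f : Nat) (el : String) (ris : List String) :
    pvLoopA d f "" el ris = ris := by
  cases f <;> simp [pvLoopA]

lemma pvLoopA_eq (d : PySem.Dict String String) :
    ∀ f x ris sub, (∃ i, i < f ∧ (fun y => d.getD y "")^[i+1] x = "") → sub ≠ "" →
      pvLoopA d (f+1) sub x ris = ris ++ pvFC d f x := by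
  intro f
  induction f with
  | zero => intro x ris sub h _; obtain ⟨i, hi, _⟩ := h; omega
  | succ f ih =>
    intro x ris sub ⟨i, hi, hit⟩ hsub
    rw [pvLoopA, if_neg hsub]
    cases hget : d.get? x with
    | none =>
      have hs : d.getD x "" = "" := by rw [PySem.Dict.getD_eq_get?_getD, hget]; rfl
      rw [pvLoopA_done, pvFC, hs]; simp
    | some s =>
      have hs : d.getD x "" = s := by rw [PySem.Dict.getD_eq_get?_getD, hget]; rfl
      by_cases hse : s = ""
      · subst hse
        simp [pvLoopA_done, pvFC, hs]
      · show pvLoopA d (f+1) s s (if s = "" then ris else ris ++ [s]) = _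
        rw [if_neg hse]
        have hstep : (fun y => d.getD y "")^[i+1] x = (fun y => d.getD y "")^[i] s := by
          rw [Function.iterate_succ_apply]; simp [hs]
        cases i with
        | zero =>
          exact absurd ((Function.iterate_zero_apply _ s ▸ hstep).symm.trans hit) hse
        | succ j =>
          have := ih s (ris ++ [s]) s ⟨j, by omega, hstep.symm.trans hit⟩ hse
          rw [this, pvFC, hs, if_neg hse]
          simp

lemma pvFC_stab (d : PySem.Dict String String) :
    ∀ i f g x, i < f → i < g → (fun y => d.getD y "")^[i+1] x = "" →
      pvFC d f x = pvFC d g x := by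
  intro i
  induction i with
  | zero =>
    intro f g x hf hg hit
    obtain ⟨f', rfl⟩ := Nat.exists_eq_add_of_lt hf
    obtain ⟨g', rfl⟩ := Nat.exists_eq_add_of_lt hg
    have hs : d.getD x "" = "" := by simpa using hit
    simp [pvFC, hs]
  | succ j ih =>
    intro f g x hf hg hit
    obtain ⟨f', rfl⟩ : ∃ f', f = f' + 1 := ⟨f - 1, by omega⟩
    obtain ⟨g', rfl⟩ : ∃ g', g = g' + 1 := ⟨g - 1, by omega⟩
    by_cases hse : d.getD x "" = ""
    · simp [pvFC, hse]
    · have hstep : (fun y => d.getD y "")^[j+1+1] x = (fun y => d.getD y "")^[j+1] (d.getD x "") := by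
        rw [Function.iterate_succ_apply]
      have := ih f' g' (d.getD x "") (by omega) (by omega) (hstep.symm.trans hit)
      simp [pvFC, hse, this]

lemma pvDescend_append (d : PySem.Dict String String) :
    ∀ f memo x stack, pvDescend d f memo x stack =
      (stack ++ (pvDescend d f memo x []).1, (pvDescend d f memo x []).2) := by
  intro f
  induction f with
  | zero => intro memo x stack; simp [pvDescend]
  | succ f ih =>
    intro memo x stack
    rw [pvDescend, pvDescend]
    by_cases hm : memo.contains x
    · simp [hm]
    · simp only [hm, Bool.false_eq_true, if_false]
      by_cases hn : d.getD x "" = ""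
      · simp [hn]
      · simp only [hn, if_false]
        rw [ih, show ([] : List (String × String)) ++ [(x, d.getD x "")] = [(x, d.getD x "")] from rfl,
          ih memo (d.getD x "") [(x, d.getD x "")]]
        simp

def pvGood (d : PySem.Dict String String) (n : Nat) (memo : PySem.Dict String (List String)) : Prop :=
  memo.keys.Nodup ∧ ∀ k, memo.contains k = true → memo.getD k [] = (pvFC d (n+1) k).reverse

lemma pvMain (d : PySem.Dict String String) (n : Nat) :
    ∀ f memo x, f ≤ n + 1 → pvGood d n memo →
      (∃ i, i < f ∧ (fun y => d.getD y "")^[i+1] x = "") →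
      pvGood d n (pvUnwind (pvDescend d (f+1) memo x []).1 (pvDescend d (f+1) memo x []).2.2) ∧
      (pvUnwind (pvDescend d (f+1) memo x []).1 (pvDescend d (f+1) memo x []).2.2).getD x []
        = (pvFC d (n+1) x).reverse := by
  intro f
  induction f with
  | zero => intro memo x _ _ hx; obtain ⟨i, hi, _⟩ := hx; omega
  | succ f ih =>
    intro memo x hf hg hx
    obtain ⟨i, hi, hit⟩ := hx
    rw [pvDescend]
    by_cases hm : memo.contains x = true
    · simp only [hm]
      exact ⟨hg, hg.2 x hm⟩
    · simp only [hm, Bool.false_eq_true, if_false]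
      by_cases hn : d.getD x "" = ""
      · simp only [hn]
        have hfcx : pvFC d (n+1) x = [] := by rw [pvFC, hn]; simp
        have hgood : pvGood d n (memo.insert x []) := by
          refine ⟨PySem.Dict.nodup_keys_insert memo x [] hg.1, ?_⟩
          intro k hk
          by_cases hkx : k = x
          · subst hkx
            rw [PySem.Dict.getD_insert_self, hfcx]; rfl
          · rw [PySem.Dict.getD_insert, if_neg hkx]
            rw [PySem.Dict.contains_insert] at hk
            have hk' : memo.contains k = true := by
              rcases Bool.or_eq_true_iff.mp hk with h | h
              · exact absurd (by simpa using h) hkx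
              · exact h
            exact hg.2 k hk'
        exact ⟨by simpa [pvUnwind] using hgood,
          by simp [pvUnwind, hfcx, PySem.Dict.getD_insert_self]⟩
      · simp only [hn, if_false]
        have hstep : (fun y => d.getD y "")^[i+1] x = (fun y => d.getD y "")^[i] (d.getD x "") := by
          rw [Function.iterate_succ_apply]
        cases i with
        | zero =>
          exact absurd ((Function.iterate_zero_apply _ _ ▸ hstep).symm.trans hit) hn
        | succ j =>
          have hterm : (fun y => d.getD y "")^[j+1] (d.getD x "") = "" := hstep.symm.trans hit
          obtain ⟨hgood', hval'⟩ := ih memo (d.getD x "") (by omega) hg ⟨j, by omega, hterm⟩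
          rw [show ([] : List (String × String)) ++ [(x, d.getD x "")] = [(x, d.getD x "")] from rfl] at *
          rw [pvDescend_append d (f+1) memo (d.getD x "") [(x, d.getD x "")]]
          set M' := pvUnwind (pvDescend d (f+1) memo (d.getD x "") []).1 (pvDescend d (f+1) memo (d.getD x "") []).2.2 with hM'
          have hunw : pvUnwind ((x, d.getD x "") :: (pvDescend d (f+1) memo (d.getD x "") []).1) (pvDescend d (f+1) memo (d.getD x "") []).2.2
              = M'.insert x (M'.getD (d.getD x "") [] ++ [d.getD x ""]) := by
            simp [pvUnwind, hM']
          have hstab : pvFC d (n+1) (d.getD x "") = pvFC d n (d.getD x "") :=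
            pvFC_stab d j (n+1) n (d.getD x "") (by omega) (by omega) hterm
          have hfcx : pvFC d (n+1) x = d.getD x "" :: pvFC d n (d.getD x "") := by
            rw [pvFC]; simp [hn]
          have hvx : M'.getD (d.getD x "") [] ++ [d.getD x ""] = (pvFC d (n+1) x).reverse := by
            rw [hval', hfcx, hstab]; simp
          have hgood2 : pvGood d n (M'.insert x (M'.getD (d.getD x "") [] ++ [d.getD x ""])) := by
            refine ⟨PySem.Dict.nodup_keys_insert M' x _ hgood'.1, ?_⟩
            intro k hk
            by_cases hkx : k = x
            · subst hkx
              rw [PySem.Dict.getD_insert, if_pos rfl, hvx]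
            · rw [PySem.Dict.getD_insert, if_neg hkx]
              rw [PySem.Dict.contains_insert] at hk
              have hk' : M'.contains k = true := by
                rcases Bool.or_eq_true_iff.mp hk with h | h
                · exact absurd (by simpa using h) hkx
                · exact h
              exact hgood'.2 k hk'
          constructor
          · show pvGood d n (pvUnwind ((x, d.getD x "") :: (pvDescend d (f+1) memo (d.getD x "") []).1) (pvDescend d (f+1) memo (d.getD x "") []).2.2)
            rw [hunw]; exact hgood2
          · show (pvUnwind ((x, d.getD x "") :: (pvDescend d (f+1) memo (d.getD x "") []).1) (pvDescend d (f+1) memo (d.getD x "") []).2.2).getD x [] = (pvFC d (n+1) x).reverse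
            rw [hunw, PySem.Dict.getD_insert, if_pos rfl, hvx]

lemma pvFold_eq (d : PySem.Dict String String) (n : Nat) :
    ∀ (l : List String) (memo out : PySem.Dict String (List String)), pvGood d n memo →
      (∀ el ∈ l, ∃ i, i < n + 1 ∧ (fun y => d.getD y "")^[i+1] el = "") →
      (l.foldl (fun st el =>
          if d.contains el then
            let r := pvDescend d (n+2) st.1 el []
            let memo2 := pvUnwind r.1 r.2.2
            (memo2, st.2.insert el (memo2.getD el []))
          else st) (memo, out)).2
      = (l.filter (fun el => d.contains el)).foldl (fun dizN el =>
          dizN.insert el ((pvLoopA d (n + 2) " " el []).reverse)) out := by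
  intro l
  induction l with
  | nil => intro memo out _ _; rfl
  | cons el l ih =>
    intro memo out hg hterm
    rw [List.foldl_cons, List.filter_cons]
    by_cases hc : d.contains el = true
    · obtain ⟨hgood2, hval⟩ := pvMain d n (n+1) memo el (le_refl _) hg (hterm el (by simp))
      simp only [hc, if_true]
      rw [ih _ _ hgood2 (fun e he => hterm e (by simp [he]))]
      rw [List.foldl_cons]
      have hA : pvLoopA d (n + 2) " " el [] = [] ++ pvFC d (n+1) el :=
        pvLoopA_eq d (n+1) el [] " " (hterm el (by simp)) (by decide)
      rw [hA, List.nil_append, ← hval]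
    · simp only [hc, Bool.false_eq_true, if_false]
      exact ih _ _ hg (fun e he => hterm e (by simp [he]))

-- ===== VERDICT (by name: the statement is the Claim_ definition above) =====
theorem creaDiz_spec : Claim_equal_creaDiz := by
  unfold Claim_equal_creaDiz
  intro diz insieme _ hpre
  unfold Spec_creaDiz creaDiz creaDiz_alt
  simp only []
  refine congrArg PySem.Dict.items ?_
  refine (pvFold_eq (PySem.Dict.ofList diz) diz.length insieme PySem.Dict.empty PySem.Dict.empty ⟨?_, ?_⟩ ?_).symm
  · exact PySem.Dict.nodup_keys_empty
  · intro k hk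
    rw [PySem.Dict.contains_empty] at hk
    exact absurd hk (by simp)
  · intro el hel
    simpa [pvStepF] using hpre el hel
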